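-- pv_equiv track=rewrite | github.com/etoitau/LeetCode-Problems | 49 Group Anagrams/test_main.py | check_list_list_anagram
-- ===== SOURCE A (Python) =====
-- def check_list_list_anagram(expected, result):
--     list_expected = list(expected)
--     list_result = list(result)
--     if len(list_expected) != len(list_result):
--         return False
--     for sub_list in list_expected:
--         sub_list.sort()
--     list_expected.sort()
--     for sub_list in list_result:
--         sub_list.sort()
--     list_result.sort()
--     is_equal = list_expected == list_result
--     return is_equal
-- ===== SOURCE B (Python) =====
-- def check_list_list_anagram(expected, result):
--     # Same return value as A; like A it sorts every sublist in place.
--     # Instead of sorting both outer lists and comparing, tally each sorted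
--     # sublist (as a tuple) into one dict: +1 for expected, -1 for result;
--     # the groupings match exactly when every tally is zero.
--     counts = {}
--     for sub in expected:
--         sub.sort()
--         key = tuple(sub)
--         counts[key] = counts.get(key, 0) + 1
--     for sub in result:
--         sub.sort()
--         key = tuple(sub)
--         counts[key] = counts.get(key, 0) - 1
--     return all(v == 0 for v in counts.values())
-- ===== Notes on version B (the rewrite author's own statement) =====
-- stated objective: alternative
-- what changed: Instead of sorting both outer lists and comparing them elementwise, B tallies each in-place-sorted sublist (as a tuple) into one dict with +1 for expected and -1 for result and returns whether every tally is zero (multiset equality); return value is identical, though on a length mismatch A returns before sorting the sublists in place while B still sorts them.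
import Mathlib
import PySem

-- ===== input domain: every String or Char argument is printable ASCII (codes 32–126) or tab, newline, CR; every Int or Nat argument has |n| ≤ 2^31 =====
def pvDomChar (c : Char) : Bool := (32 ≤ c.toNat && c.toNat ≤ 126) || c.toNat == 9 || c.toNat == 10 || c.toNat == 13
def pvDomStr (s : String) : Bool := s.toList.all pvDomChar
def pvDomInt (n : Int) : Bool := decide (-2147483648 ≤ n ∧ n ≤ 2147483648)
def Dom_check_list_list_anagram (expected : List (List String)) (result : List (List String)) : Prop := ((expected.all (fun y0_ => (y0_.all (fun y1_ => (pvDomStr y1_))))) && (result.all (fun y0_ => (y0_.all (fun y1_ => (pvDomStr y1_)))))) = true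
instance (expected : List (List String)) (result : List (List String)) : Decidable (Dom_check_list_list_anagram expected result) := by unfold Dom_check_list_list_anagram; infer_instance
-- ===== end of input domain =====

-- B replaces A's sort-both-outer-lists-and-compare by a single +1/-1 dict tally of the
-- sorted sublists (multiset equality); return values are proved equal — as in A the
-- sublists are sorted in place in Python, except that on a length mismatch A returns
-- before mutating while B still sorts them (return value unaffected).


-- ===== PORT A =====
def check_list_list_anagram (expected : List (List String)) (result : List (List String)) : Bool :=
  let list_expected := expected
  let list_result := result
  if list_expected.length != list_result.length then false
  else
    let list_expected := list_expected.map (fun sub_list => PySem.List.sorted sub_list (fun x => x) false)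
    let list_expected := PySem.List.sorted list_expected (fun x => x) false
    let list_result := list_result.map (fun sub_list => PySem.List.sorted sub_list (fun x => x) false)
    let list_result := PySem.List.sorted list_result (fun x => x) false
    let is_equal := list_expected == list_result
    is_equal

-- ===== PORT B =====
def check_list_list_anagram_alt (expected : List (List String)) (result : List (List String)) : Bool :=
  let counts : PySem.Dict (List String) Int := PySem.Dict.empty
  let counts := expected.foldl (fun counts sub =>
      let key := PySem.List.sorted sub (fun x => x) false
      counts.insert key (counts.getD key 0 + 1)) counts
  let counts := result.foldl (fun counts sub =>
      let key := PySem.List.sorted sub (fun x => x) false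
      counts.insert key (counts.getD key 0 - 1)) counts
  counts.values.all (fun v => v == (0 : Int))

-- ===== PRECONDITION & SPEC =====
def Spec_check_list_list_anagram (expected : List (List String)) (result : List (List String)) (out : Bool) : Prop := out = check_list_list_anagram_alt expected result
instance (expected : List (List String)) (result : List (List String)) (out : Bool) : Decidable (Spec_check_list_list_anagram expected result out) := by unfold Spec_check_list_list_anagram; infer_instance

-- ===== CLAIM (what is proved, stated in full; the proofs are below) =====
def Claim_equal_check_list_list_anagram : Prop := ∀ (expected : List (List String)) (result : List (List String)), Dom_check_list_list_anagram expected result → Spec_check_list_list_anagram expected result (check_list_list_anagram expected result)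

-- ===== LEMMAS AND PROOFS =====

-- getD after B's +1 tally loop (keyed fold; the keyed twin of PySem.Dict.getD_foldl_insert_add_one)
theorem getD_tally_plus {β κ : Type} [BEq κ] [LawfulBEq κ] (f : β → κ)
    (l : List β) (d : PySem.Dict κ Int) (v : κ) :
    (l.foldl (fun d x => d.insert (f x) (d.getD (f x) 0 + 1)) d).getD v 0
      = d.getD v 0 + ((l.map f).count v : Int) := by
  induction l generalizing d with
  | nil => simp
  | cons x xs ih =>
    simp only [List.foldl_cons, ih, List.map_cons, List.count_cons]
    by_cases h : v = f x
    · subst h; rw [PySem.Dict.getD_insert_self]; simp; ring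
    · have h' : ¬ f x = v := fun hh => h hh.symm
      rw [PySem.Dict.getD_insert_of_ne] <;> simp [beq_iff_eq, h, h']

-- getD after B's -1 tally loop
theorem getD_tally_minus {β κ : Type} [BEq κ] [LawfulBEq κ] (f : β → κ)
    (l : List β) (d : PySem.Dict κ Int) (v : κ) :
    (l.foldl (fun d x => d.insert (f x) (d.getD (f x) 0 - 1)) d).getD v 0
      = d.getD v 0 - ((l.map f).count v : Int) := by
  induction l generalizing d with
  | nil => simp
  | cons x xs ih =>
    simp only [List.foldl_cons, ih, List.map_cons, List.count_cons]
    by_cases h : v = f x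
    · subst h; rw [PySem.Dict.getD_insert_self]; simp; ring
    · have h' : ¬ f x = v := fun hh => h hh.symm
      rw [PySem.Dict.getD_insert_of_ne] <;> simp [beq_iff_eq, h, h']

-- B decides multiset equality of the sorted sublists
theorem alt_eq_true_iff_perm (expected result : List (List String)) :
    check_list_list_anagram_alt expected result = true
      ↔ (expected.map (fun s => PySem.List.sorted s (fun x => x) false)).Perm
          (result.map (fun s => PySem.List.sorted s (fun x => x) false)) := by
  unfold check_list_list_anagram_alt
  simp only []
  set f : List String → List String := fun s => PySem.List.sorted s (fun x => x) false with hf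
  set d1 := expected.foldl
      (fun (counts : PySem.Dict (List String) Int) sub =>
        counts.insert (f sub) (counts.getD (f sub) 0 + 1)) PySem.Dict.empty with hd1
  set d2 := result.foldl
      (fun (counts : PySem.Dict (List String) Int) sub =>
        counts.insert (f sub) (counts.getD (f sub) 0 - 1)) d1 with hd2
  set E := expected.map f with hE
  set R := result.map f with hR
  have hgetD1 : ∀ v, d1.getD v 0 = (E.count v : Int) := by
    intro v; rw [hd1, getD_tally_plus, ← hE]; simp
  have hgetD2 : ∀ v, d2.getD v 0 = (E.count v : Int) - (R.count v : Int) := by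
    intro v; rw [hd2, getD_tally_minus, ← hR, hgetD1]
  have hnodup1 : d1.keys.Nodup := by
    rw [hd1]
    exact PySem.Dict.nodup_keys_foldl_insert_key _ f _ _ (by simp [PySem.Dict.keys_empty])
  have hnodup2 : d2.keys.Nodup := by
    rw [hd2]
    exact PySem.Dict.nodup_keys_foldl_insert_key _ f _ _ hnodup1
  have hmemkeys : ∀ k, k ∈ d2.keys → k ∈ E ∨ k ∈ R := by
    intro k hk
    rw [hd2, PySem.Dict.keys_foldl_insert_key, PySem.Set.mem_update] at hk
    rcases hk with hk | hk
    · rw [hd1, PySem.Dict.keys_foldl_insert_key, PySem.Set.mem_update] at hk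
      rcases hk with hk | hk
      · simp [PySem.Dict.keys_empty] at hk
      · exact Or.inl hk
    · exact Or.inr hk
  have hmemkeys' : ∀ k, k ∈ E → k ∈ d2.keys := by
    intro k hk
    rw [hd2, PySem.Dict.keys_foldl_insert_key, PySem.Set.mem_update]
    left
    rw [hd1, PySem.Dict.keys_foldl_insert_key, PySem.Set.mem_update]
    exact Or.inr hk
  have hmemkeys'' : ∀ k, k ∈ R → k ∈ d2.keys := by
    intro k hk
    rw [hd2, PySem.Dict.keys_foldl_insert_key, PySem.Set.mem_update]
    exact Or.inr hk
  have hvals : d2.values = d2.keys.map (fun k => d2.getD k 0) :=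
    PySem.Dict.values_eq_map_keys d2 hnodup2 0
  rw [hvals]
  simp only [List.all_map, List.all_eq_true, Function.comp, beq_iff_eq]
  constructor
  · intro h
    rw [List.perm_iff_count]
    intro k
    by_cases hk : k ∈ d2.keys
    · have h0 := h k hk
      have h2 := hgetD2 k
      omega
    · rw [List.count_eq_zero_of_not_mem (fun hm => hk (hmemkeys' k hm)),
          List.count_eq_zero_of_not_mem (fun hm => hk (hmemkeys'' k hm))]
  · intro hperm k _
    have hc := List.perm_iff_count.1 hperm k
    have h2 := hgetD2 k
    omega

-- sorted-by-identity is the same list under any two LT instances that order alike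
theorem sorted_ext {k : Type} (i1 i2 : LT k)
    (d1 : DecidableRel (@LT.lt k i1)) (d2 : DecidableRel (@LT.lt k i2))
    (h : ∀ a b : k, @LT.lt k i1 a b ↔ @LT.lt k i2 a b) (xs : List k) :
    @PySem.List.sorted k k i1 d1 xs (fun x => x) false
      = @PySem.List.sorted k k i2 d2 xs (fun x => x) false := by
  rw [@PySem.List.sorted_eq_foldl_insertBy k k i1 d1 xs (fun x => x),
      @PySem.List.sorted_eq_foldl_insertBy k k i2 d2 xs (fun x => x)]
  congr 1
  funext acc x
  congr 1
  funext a b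
  exact decide_eq_decide.mpr (h a b)

-- A decides equality of the two sorted lists of sorted sublists
theorem a_eq_true_iff_perm (expected result : List (List String)) :
    check_list_list_anagram expected result = true
      ↔ (expected.map (fun s => PySem.List.sorted s (fun x => x) false)).Perm
          (result.map (fun s => PySem.List.sorted s (fun x => x) false)) := by
  unfold check_list_list_anagram
  by_cases hlen : expected.length = result.length
  · simp only [hlen, bne_self_eq_false, Bool.false_eq_true, if_false, beq_iff_eq]
    have h2 := PySem.List.sorted_id_eq_sorted_id_iff_perm (κ := List String)
        (expected.map (fun s => PySem.List.sorted s (fun x => x) false))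
        (result.map (fun s => PySem.List.sorted s (fun x => x) false))
    have hiff : ∀ a b : List String, @LT.lt (List String) List.instLT a b ↔ a < b :=
      fun a b => List.lt_iff_lex_lt a b
    rw [← sorted_ext List.instLT _ (fun a b => List.decidableLT a b) _ hiff
          (expected.map (fun s => PySem.List.sorted s (fun x => x) false)),
        ← sorted_ext List.instLT _ (fun a b => List.decidableLT a b) _ hiff
          (result.map (fun s => PySem.List.sorted s (fun x => x) false))] at h2
    exact h2
  · have hbne : (expected.length != result.length) = true := by
      simpa [bne_iff_ne] using hlen
    simp only [hbne, if_true]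
    constructor
    · intro h; exact absurd h (by simp)
    · intro hperm
      exact absurd (by simpa using hperm.length_eq) hlen

-- ===== VERDICT (by name: the statement is the Claim_ definition above) =====
theorem check_list_list_anagram_spec : Claim_equal_check_list_list_anagram := by
  unfold Claim_equal_check_list_list_anagram Spec_check_list_list_anagram
  intro expected result _
  rw [Bool.eq_iff_iff, a_eq_true_iff_perm, alt_eq_true_iff_perm]
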